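-- pv_equiv track=rewrite | github.com/phlalx/algorithms | leetcode/696.count-binary-substrings.python3.py | f
-- ===== SOURCE A (Python) =====
-- def f(nums):
--     counts = []
--     cur = nums[0]
--     cur_count = 1
--     for num in nums[1:]:
--         if num != cur:
--             counts.append(cur_count)
--             cur_count = 1
--             cur = num
--         else:
--             cur_count += 1
--     counts.append(cur_count)
--     res = 0
--     for i in range(len(counts) - 1):
--         res += min(counts[i], counts[i + 1])
--     return res
-- ===== SOURCE B (Python) =====
-- def f(nums):
--     bit = nums[0]
--     prev = 0
--     cur = 1
--     res = 0
--     for num in nums[1:]: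
--         if num == bit:
--             cur += 1
--         else:
--             res += min(prev, cur)
--             prev = cur
--             cur = 1
--             bit = num
--     return res + min(prev, cur)
-- ===== Notes on version B (the rewrite author's own statement) =====
-- stated objective: simpler
-- what changed: B never materializes the run-length counts list: it keeps only two scalar run lengths (prev, cur) and accumulates the answer in a single pass, instead of A's build-an-RLE-array pass followed by a second indexed pass over adjacent pairs.
import Mathlib
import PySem

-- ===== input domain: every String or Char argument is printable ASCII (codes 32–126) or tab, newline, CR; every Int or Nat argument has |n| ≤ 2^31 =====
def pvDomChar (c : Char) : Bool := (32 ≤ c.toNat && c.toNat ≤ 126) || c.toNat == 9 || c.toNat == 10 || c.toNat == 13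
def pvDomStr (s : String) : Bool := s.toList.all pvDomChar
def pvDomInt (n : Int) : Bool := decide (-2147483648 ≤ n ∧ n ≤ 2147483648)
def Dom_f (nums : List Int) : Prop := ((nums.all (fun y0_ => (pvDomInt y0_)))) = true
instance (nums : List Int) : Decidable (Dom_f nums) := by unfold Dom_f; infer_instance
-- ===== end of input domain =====

-- One honest line: B keeps two scalar run lengths instead of A's run-length list and
-- folds A's two passes into one; objective: simpler (O(1) extra space).

-- ===== PORT A =====
-- literal transliteration of A: build the RLE counts list, then a second
-- indexed loop summing min(counts[i], counts[i+1]).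
def f (nums : List Int) : Int :=
  match nums with
  | [] => 0  -- unreachable under Pre_f (Python raises IndexError reading the first element)
  | x :: rest =>
    let s := rest.foldl
      (fun (st : List Int × Int × Int) num =>
        let counts := st.1; let cur := st.2.1; let cur_count := st.2.2
        if num ≠ cur then (counts ++ [cur_count], num, 1)
        else (counts, cur, cur_count + 1))
      ([], x, 1)
    let counts := s.1 ++ [s.2.2]
    (PySem.List.pyRange 0 ((counts.length : Int) - 1) 1).foldl
      (fun res i =>
        res + min (PySem.List.pyGetD counts i 0) (PySem.List.pyGetD counts (i + 1) 0))
      0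

-- ===== PORT B =====
-- literal transliteration of Source B: one pass, scalar state (bit, prev, cur, res).
def f_alt (nums : List Int) : Int :=
  match nums with
  | [] => 0  -- unreachable under Pre_f (Python raises IndexError reading the first element)
  | x :: rest =>
    let s := rest.foldl
      (fun (st : Int × Int × Int × Int) num =>
        let bit := st.1; let prev := st.2.1; let cur := st.2.2.1; let res := st.2.2.2
        if num == bit then (bit, prev, cur + 1, res)
        else (num, cur, 1, res + min prev cur))
      (x, 0, 1, 0)
    s.2.2.2 + min s.2.1 s.2.2.1

-- ===== PRECONDITION & SPEC =====
-- Pre_f excludes only the empty list, on which A raises IndexError when reading the first element.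
def Pre_f (nums : List Int) : Prop := nums ≠ []
instance (nums : List Int) : Decidable (Pre_f nums) := by unfold Pre_f; infer_instance
def pvWitness_f : List Int := [0, 0, 1, 0, 1, 1]
def Spec_f (nums : List Int) (out : Int) : Prop := out = f_alt nums
instance (nums : List Int) (out : Int) : Decidable (Spec_f nums out) := by unfold Spec_f; infer_instance

-- ===== CLAIM (what is proved, stated in full; the proofs are below) =====
def Claim_equal_f : Prop := ∀ (nums : List Int), Dom_f nums → Pre_f nums → Spec_f nums (f nums)

-- ===== LEMMAS AND PROOFS =====

-- sum of min over adjacent pairs, structurally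
def adjSum : List Int → Int
  | [] => 0
  | [_] => 0
  | a :: b :: t => min a b + adjSum (b :: t)

theorem adjSum_concat : ∀ (cs : List Int) (c : Int), 0 ≤ c →
    adjSum (cs ++ [c]) = adjSum cs + min (cs.getLastD 0) c := by
  intro cs
  induction cs with
  | nil => intro c hc; simp [adjSum]; omega
  | cons a t ih =>
    intro c hc
    cases t with
    | nil => simp [adjSum]
    | cons b t' =>
      have := ih c hc
      simp only [List.cons_append, adjSum] at *
      rw [this]; ring_nf; rfl

theorem pyGetD_cons_shift (x : Int) (l : List Int) (k : Int) (hk : 0 ≤ k) :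
    PySem.List.pyGetD (x :: l) (1 + k) 0 = PySem.List.pyGetD l k 0 := by
  obtain ⟨n, rfl⟩ := Int.eq_ofNat_of_zero_le hk
  have h1 : (1 : Int) + (n : Int) = ((n + 1 : Nat) : Int) := by push_cast; ring
  rw [h1, PySem.List.pyGetD_natCast, PySem.List.pyGetD_natCast]
  simp

-- A's second (indexed) loop computes adjSum of the counts list
theorem loop_eq_adjSum : ∀ (l : List Int) (res : Int),
    (PySem.List.pyRange 0 ((l.length : Int) - 1) 1).foldl
      (fun r i => r + min (PySem.List.pyGetD l i 0) (PySem.List.pyGetD l (i + 1) 0)) res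
    = res + adjSum l := by
  intro l
  induction l with
  | nil => intro res; simp [adjSum, PySem.List.pyRange_one_eq_nil]
  | cons a t ih =>
    cases t with
    | nil => intro res; simp [adjSum, PySem.List.pyRange_one_eq_nil]
    | cons b t' =>
      intro res
      have hb : (((a :: b :: t').length : Int) - 1) = (t'.length : Int) + 1 := by
        simp
      rw [hb, PySem.List.pyRange_one_cons (by positivity)]
      simp only [List.foldl_cons]
      have h0 : res + min (PySem.List.pyGetD (a :: b :: t') 0 0) (PySem.List.pyGetD (a :: b :: t') (0+1) 0) = res + min a b := by
        have h1 : PySem.List.pyGetD (a :: b :: t') (0 + 1) 0 = b := by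
          rw [show (0:Int) + 1 = 1 + 0 by ring, pyGetD_cons_shift a _ 0 le_rfl,
              PySem.List.pyGetD_zero_cons]
        rw [h1, PySem.List.pyGetD_zero_cons]
      rw [h0, show (0:Int) + 1 = 1 from rfl]
      have hshift : PySem.List.pyRange 1 ((t'.length : Int) + 1) 1
          = (PySem.List.pyRange 0 ((t'.length : Int)) 1).map (fun k => 1 + k) := by
        rw [PySem.List.pyRange_one, PySem.List.pyRange_one]
        simp [List.map_map, Function.comp]
      rw [hshift, List.foldl_map]
      rw [PySem.List.foldl_congr_mem' (PySem.List.pyRange 0 ((t'.length : Int)) 1) _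
            (fun (r : Int) (k : Int) =>
              r + min (PySem.List.pyGetD (b :: t') k 0) (PySem.List.pyGetD (b :: t') (k + 1) 0))
            (res + min a b)
            (by
              intro k hk acc
              have h0k : 0 ≤ k := (PySem.List.mem_pyRange_one.mp hk).1
              rw [pyGetD_cons_shift a _ k h0k,
                  show 1 + k + 1 = 1 + (k + 1) by ring,
                  pyGetD_cons_shift a _ (k + 1) (by omega)])]
      have hb2 : ((t'.length : Int)) = (((b :: t').length : Int) - 1) := by simp
      rw [hb2, ih]
      simp [adjSum]; ring

-- the two loop bodies, named (definitionally equal to the ports' lambdas)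
def stepA (st : List Int × Int × Int) (num : Int) : List Int × Int × Int :=
  if num ≠ st.2.1 then (st.1 ++ [st.2.2], num, 1) else (st.1, st.2.1, st.2.2 + 1)

def stepB (st : Int × Int × Int × Int) (num : Int) : Int × Int × Int × Int :=
  if num == st.1 then (st.1, st.2.1, st.2.2.1 + 1, st.2.2.2)
  else (num, st.2.2.1, 1, st.2.2.2 + min st.2.1 st.2.2.1)

-- invariant: B's scalar state tracks (last run length, adjSum) of A's counts list
theorem fold_inv : ∀ (xs cs : List Int) (bit cur : Int), 1 ≤ cur →
    xs.foldl stepB (bit, cs.getLastD 0, cur, adjSum cs)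
      = ((xs.foldl stepA (cs, bit, cur)).2.1,
         (xs.foldl stepA (cs, bit, cur)).1.getLastD 0,
         (xs.foldl stepA (cs, bit, cur)).2.2,
         adjSum (xs.foldl stepA (cs, bit, cur)).1)
    ∧ 1 ≤ (xs.foldl stepA (cs, bit, cur)).2.2 := by
  intro xs
  induction xs with
  | nil => intro cs bit cur h; exact ⟨rfl, h⟩
  | cons x t ih =>
    intro cs bit cur h
    simp only [List.foldl_cons]
    by_cases hx : x = bit
    · have hA : stepA (cs, bit, cur) x = (cs, bit, cur + 1) := by
        simp [stepA, hx]
      have hB : stepB (bit, cs.getLastD 0, cur, adjSum cs) x = (bit, cs.getLastD 0, cur + 1, adjSum cs) := by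
        simp [stepB, hx]
      rw [hA, hB]; exact ih cs bit (cur + 1) (by omega)
    · have hA : stepA (cs, bit, cur) x = (cs ++ [cur], x, 1) := by
        simp [stepA, hx]
      have hB : stepB (bit, cs.getLastD 0, cur, adjSum cs) x
          = (x, cur, 1, adjSum cs + min (cs.getLastD 0) cur) := by
        simp [stepB, hx]
      rw [hA, hB]
      have hlast : (cs ++ [cur]).getLastD 0 = cur := by
        simp
      have hadj : adjSum cs + min (cs.getLastD 0) cur = adjSum (cs ++ [cur]) := by
        rw [adjSum_concat cs cur (by omega)]
      rw [hadj]
      have H := ih (cs ++ [cur]) x 1 le_rfl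
      rw [hlast] at H
      exact H

-- ===== VERDICT (by name: the statement is the Claim_ definition above) =====
theorem f_spec : Claim_equal_f := by
  intro nums _ hpre
  unfold Spec_f
  cases nums with
  | nil => exact absurd rfl hpre
  | cons x rest =>
    have hA : f (x :: rest)
        = (PySem.List.pyRange 0
            (((((rest.foldl stepA ([], x, 1)).1 ++ [(rest.foldl stepA ([], x, 1)).2.2]).length : Int)) - 1) 1).foldl
            (fun res i =>
              res + min (PySem.List.pyGetD ((rest.foldl stepA ([], x, 1)).1 ++ [(rest.foldl stepA ([], x, 1)).2.2]) i 0)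
                        (PySem.List.pyGetD ((rest.foldl stepA ([], x, 1)).1 ++ [(rest.foldl stepA ([], x, 1)).2.2]) (i + 1) 0))
            0 := rfl
    have hB : f_alt (x :: rest)
        = (rest.foldl stepB (x, 0, 1, 0)).2.2.2
          + min (rest.foldl stepB (x, 0, 1, 0)).2.1 (rest.foldl stepB (x, 0, 1, 0)).2.2.1 := rfl
    rw [hA, hB]
    obtain ⟨Heq, Hpos⟩ := fold_inv rest [] x 1 le_rfl
    have hinit : (x, ([] : List Int).getLastD 0, (1:Int), adjSum []) = ((x, 0, 1, 0) : Int × Int × Int × Int) := rfl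
    rw [hinit] at Heq
    rw [Heq, loop_eq_adjSum, adjSum_concat _ _ (by omega)]
    simp
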